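-- pv_equiv track=rewrite | github.com/hieule88/fssstock | abnormalstock/abnormaldetect/cmdbackend.py | task_para_matrix
-- ===== SOURCE A (Python) =====
-- def task_para_matrix(v_para_variables, v_para_dict):
--     try:
--         #v_para_variables: Là chuỗi chưa tên biến
--         #v_para_dict: dictionary các giá trị của từng biến
--         set_count = 1
--         para_count = 0
--         para_variables = v_para_variables
--         para_dict = v_para_dict
--         para_tag = '@'
--         arr_dict_value_prev = []
--         arr_dict_value_curr = []
--         for key in para_dict:
--             para_count = para_count + 1
--             para_name = para_tag + key + para_tag
--             #Get paraname
--             #s = para_dict.get(key).replace('{','')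
--             #s = s.replace('}','')
--             arr_val = para_dict.get(key).split('/')
--             #Lấy danh sách các giá trị của biến
--             x = len(arr_val)
--             arr_dict_value_curr = []
--             if (para_count==1):
--                 #Nếu là biến đầu tiên thì là mảng một chiều với số phần tử bằng đúng số giá trị
--                 for i in range(len(arr_val)):
--                     arr_dict_value_curr.append(para_variables.replace(para_name, arr_val[i]))
--             else:
--                 #Nếu là biến tiếp theo thì mảng tham số trước sẽ phải nhân thêm x lần giá trị
--                 for i_para_idx in range(len(arr_val)):
--                     for i_prev_idx in range(len(arr_dict_value_prev)):
--                         #Quét hết các giá trị trước đó để thêm giá trị tham số mới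
--                         arr_dict_value_curr.append(arr_dict_value_prev[i_prev_idx].replace(para_name, arr_val[i_para_idx]))
--             set_count = set_count*x
--             arr_dict_value_prev = arr_dict_value_curr
--         return arr_dict_value_prev
--     except:
--         # Re-raise the exception.
--         raise
-- ===== SOURCE B (Python) =====
-- def task_para_matrix(v_para_variables, v_para_dict):
--     # Cartesian-product decomposition: build all value combinations first
--     # (as shared cons pairs), then substitute each complete combination into
--     # the template in one pass per combination.
--     if not v_para_dict:
--         return []
--     keys = list(v_para_dict)
--     value_lists = [v_para_dict[k].split('/') for k in keys]
--     combos = [None]          # None = empty combination; (v, rest) = cons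
--     for vals in reversed(value_lists):
--         combos = [(v, c) for c in combos for v in vals]
--     result = []
--     for combo in combos:
--         s = v_para_variables
--         c = combo
--         for k in keys:
--             v, c = c
--             s = s.replace('@' + k + '@', v)
--         result.append(s)
--     return result
-- ===== Notes on version B (the rewrite author's own statement) =====
-- stated objective: alternative
-- what changed: A grows a list of partially substituted strings key by key (re-scanning the whole previous list for each new value); B first materialises the Cartesian product of the split value lists (reversed, so the first key varies fastest like A) and then substitutes each complete combination into the template in one pass per combination.
import Mathlib
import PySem

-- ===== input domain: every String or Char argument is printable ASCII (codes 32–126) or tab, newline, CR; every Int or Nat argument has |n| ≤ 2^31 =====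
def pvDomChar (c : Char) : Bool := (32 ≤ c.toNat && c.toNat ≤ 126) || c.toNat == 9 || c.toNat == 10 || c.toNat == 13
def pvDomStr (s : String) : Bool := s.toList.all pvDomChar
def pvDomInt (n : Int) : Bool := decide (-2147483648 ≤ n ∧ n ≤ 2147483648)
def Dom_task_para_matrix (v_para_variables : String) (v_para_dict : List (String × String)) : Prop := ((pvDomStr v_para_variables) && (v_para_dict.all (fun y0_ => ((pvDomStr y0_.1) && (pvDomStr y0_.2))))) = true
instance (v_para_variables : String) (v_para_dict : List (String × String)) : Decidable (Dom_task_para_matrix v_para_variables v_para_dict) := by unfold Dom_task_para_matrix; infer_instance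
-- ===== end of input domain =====

-- B replaces A's incremental prev-array expansion by an explicit Cartesian product of the
-- value combinations followed by a single substitution pass per combination (objective: alternative).

-- ===== PORT A =====
-- loop body of A's 'for key in para_dict' loop; state = (set_count, para_count, arr_dict_value_prev)
def pvAStep (v_para_variables : String) (v_para_dict : List (String × String))
    (st : Int × Int × List String) (kv : String × String) : Int × Int × List String :=
  let para_tag := "@"
  let set_count := st.1
  let para_count := st.2.1 + 1
  let para_name := para_tag ++ kv.1 ++ para_tag
  -- para_dict.get(key): first-match lookup in the dict
  let arr_val := (PySem.Str.split? ((PySem.Dict.get? (PySem.Dict.mk v_para_dict) kv.1).getD "") "/").getD []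
  let x : Int := arr_val.length
  let arr_dict_value_curr :=
    if para_count = 1 then
      arr_val.foldl (fun acc v => acc ++ [PySem.Str.replace v_para_variables para_name v]) []
    else
      arr_val.foldl (fun acc v =>
        st.2.2.foldl (fun acc2 p => acc2 ++ [PySem.Str.replace p para_name v]) acc) []
  (set_count * x, para_count, arr_dict_value_curr)

def task_para_matrix (v_para_variables : String) (v_para_dict : List (String × String)) : List String :=
  (v_para_dict.foldl (pvAStep v_para_variables v_para_dict) (1, 0, [])).2.2

-- ===== PORT B =====
def task_para_matrix_alt (v_para_variables : String) (v_para_dict : List (String × String)) : List String :=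
  if v_para_dict.isEmpty then [] else
    let keys := v_para_dict.map Prod.fst
    let value_lists := v_para_dict.map (fun kv => (PySem.Str.split? kv.2 "/").getD [])
    let combos := value_lists.reverse.foldl
      (fun combos vals => combos.flatMap (fun c => vals.map (fun v => v :: c))) [[]]
    combos.map (fun combo =>
      (keys.zip combo).foldl (fun s kv => PySem.Str.replace s ("@" ++ kv.1 ++ "@") kv.2) v_para_variables)

-- ===== PRECONDITION & SPEC =====
-- Pre_ excludes association lists with duplicate keys: those cannot arise from a Python dict
-- (the dict invariant), and on them A's first-match .get(key) lookup and B's per-pair values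
-- would read different values for the second occurrence of a key.
def Pre_task_para_matrix (v_para_variables : String) (v_para_dict : List (String × String)) : Prop :=
  (v_para_dict.map Prod.fst).Nodup
instance (v_para_variables : String) (v_para_dict : List (String × String)) : Decidable (Pre_task_para_matrix v_para_variables v_para_dict) := by unfold Pre_task_para_matrix; infer_instance

def pvWitness_task_para_matrix : String × (List (String × String)) :=
  ("@x@-@y@", [("x", "a/b"), ("y", "1/2")])

def Spec_task_para_matrix (v_para_variables : String) (v_para_dict : List (String × String)) (out : List String) : Prop := out = task_para_matrix_alt v_para_variables v_para_dict
instance (v_para_variables : String) (v_para_dict : List (String × String)) (out : List String) : Decidable (Spec_task_para_matrix v_para_variables v_para_dict out) := by unfold Spec_task_para_matrix; infer_instance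

-- ===== CLAIM (what is proved, stated in full; the proofs are below) =====
def Claim_equal_task_para_matrix : Prop := ∀ (v_para_variables : String) (v_para_dict : List (String × String)), Dom_task_para_matrix v_para_variables v_para_dict → Pre_task_para_matrix v_para_variables v_para_dict → Spec_task_para_matrix v_para_variables v_para_dict (task_para_matrix v_para_variables v_para_dict)

-- ===== LEMMAS AND PROOFS =====

-- the pure step both programs share semantically: expand prev by one variable
def pvStep (prev : List String) (kv : String × String) : List String :=
  ((PySem.Str.split? kv.2 "/").getD []).flatMap
    (fun v => prev.map (fun p => PySem.Str.replace p ("@" ++ kv.1 ++ "@") v))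

-- B's combination list, written as a foldr
def pvCombos (ls : List (List String)) : List (List String) :=
  ls.foldr (fun vs cs => cs.flatMap (fun c => vs.map (fun v => v :: c))) [[]]

-- substitute one combination into a template
def pvSubst (tpl : String) (ps : List (String × String)) : String :=
  ps.foldl (fun s kv => PySem.Str.replace s ("@" ++ kv.1 ++ "@") kv.2) tpl

lemma foldl_pvStep (d : List (String × String)) :
    ∀ acc : List String,
      d.foldl pvStep acc
        = (pvCombos (d.map (fun kv => (PySem.Str.split? kv.2 "/").getD []))).flatMap
            (fun c => acc.map (fun p => pvSubst p ((d.map Prod.fst).zip c))) := by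
  induction d with
  | nil => intro acc; simp [pvCombos, pvSubst]
  | cons kv rest ih =>
      intro acc
      simp only [List.foldl_cons, ih, List.map_cons, pvCombos, List.foldr_cons,
        List.flatMap_assoc, List.flatMap_map, List.map_flatMap, List.map_map,
        List.zip_cons_cons, pvStep, pvSubst, Function.comp_def]

lemma pvA_tail (tpl : String) (D : List (String × String)) (rest : List (String × String))
    (hget : ∀ kv ∈ rest, (PySem.Dict.get? (PySem.Dict.mk D) kv.1).getD "" = kv.2) :
    ∀ (sc n : Int) (prev : List String), 1 ≤ n →
      (rest.foldl (pvAStep tpl D) (sc, n, prev)).2.2 = rest.foldl pvStep prev := by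
  induction rest with
  | nil => intro sc n prev _; rfl
  | cons kv r ih =>
      intro sc n prev hn
      have hkv := hget kv (List.mem_cons_self ..)
      simp only [List.foldl_cons]
      have hns : ¬ (n + 1 = 1) := by omega
      rw [show pvAStep tpl D (sc, n, prev) kv
            = (sc * (((PySem.Str.split? kv.2 "/").getD []).length : Int), n + 1, pvStep prev kv) from ?_]
      · exact ih (fun kv' h => hget kv' (List.mem_cons_of_mem _ h)) _ _ _ (by omega)
      · simp only [pvAStep, hkv, if_neg hns]
        refine Prod.ext rfl (Prod.ext rfl ?_)
        simp only [PySem.List.foldl_append_singleton_eq_map]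
        rw [PySem.List.foldl_append_eq_flatMap]
        simp [pvStep]

lemma pvA_nonempty (tpl : String) (kv : String × String) (rest : List (String × String))
    (hnd : ((kv :: rest).map Prod.fst).Nodup) :
    task_para_matrix tpl (kv :: rest) = (kv :: rest).foldl pvStep [tpl] := by
  have hget : ∀ kv' ∈ rest,
      (PySem.Dict.get? (PySem.Dict.mk (kv :: rest)) kv'.1).getD "" = kv'.2 := by
    intro kv' h
    have hmem : (kv'.1, kv'.2) ∈ (PySem.Dict.mk (kv :: rest)).items := by
      show (kv'.1, kv'.2) ∈ kv :: rest
      exact List.mem_cons_of_mem _ (by simpa using h)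
    have hnd' : (PySem.Dict.mk (kv :: rest)).keys.Nodup := by
      simpa [PySem.Dict.keys_mk] using hnd
    rw [PySem.Dict.get?_of_mem_items _ hmem hnd']
    rfl
  have hhead : (PySem.Dict.get? (PySem.Dict.mk (kv :: rest)) kv.1).getD "" = kv.2 := by
    rw [PySem.Dict.get?_mk_cons]; simp
  unfold task_para_matrix
  simp only [List.foldl_cons]
  rw [show pvAStep tpl (kv :: rest) (1, 0, []) kv
        = (1 * (((PySem.Str.split? kv.2 "/").getD []).length : Int), 1, pvStep [tpl] kv) from ?_]
  · rw [pvA_tail tpl (kv :: rest) rest hget _ _ _ (by omega)]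
  · simp only [pvAStep, hhead, zero_add]
    refine Prod.ext rfl (Prod.ext rfl ?_)
    rw [PySem.List.foldl_append_singleton_eq_map]
    simp [pvStep, ← List.map_eq_flatMap]

theorem task_para_matrix_spec : Claim_equal_task_para_matrix := by
  intro tpl d _ hpre
  unfold Spec_task_para_matrix
  cases d with
  | nil => rfl
  | cons kv rest =>
      rw [pvA_nonempty tpl kv rest hpre, foldl_pvStep]
      simp only [task_para_matrix_alt, List.isEmpty_cons, if_neg Bool.false_ne_true]
      rw [List.foldl_reverse]
      simp only [pvSubst, ← List.map_eq_flatMap, List.map_singleton]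
      rfl
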